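-- pv_equiv track=rewrite | github.com/olaugh/mac-maven-analysis | validate_dawg.py | walk_dawg_scan
-- ===== SOURCE A (Python) =====
-- def walk_dawg(entries, start_idx, remaining_word):
--     """Walk DAWG from start_idx looking for remaining_word."""
--     if not remaining_word:
--         return True  # All letters matched
--
--     if start_idx <= 0 or start_idx >= len(entries):
--         return False
--
--     target = remaining_word[0].lower()
--     idx = start_idx
--
--     # Walk sibling chain
--     while idx < len(entries):
--         entry = entries[idx]
--         letter = chr(entry & 0xFF)
--         is_word = bool(entry & 0x100)
--         is_last = bool(entry & 0x200)
--         child = entry >> 10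
--
--         if letter == target:
--             if len(remaining_word) == 1:
--                 # Last letter - must have WORD flag
--                 return is_word
--             else:
--                 # More letters to go - must have child
--                 if child > 0:
--                     return walk_dawg(entries, child, remaining_word[1:])
--                 else:
--                     return False
--
--         if is_last:
--             break
--         idx += 1
--
--     return False
--
-- def walk_dawg_scan(entries, start, end, word):
--     """Scan a section looking for a word. Brute force approach."""
--     if not word:
--         return False
--
--     # Look for the first letter anywhere in the section
--     target = word[0].lower()
--
--     for idx in range(start, end):
--         entry = entries[idx]
--         letter = chr(entry & 0xFF)
--
--         if letter == target:
--             child = entry >> 10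
--
--             if len(word) == 1:
--                 if entry & 0x100:
--                     return True
--             elif child > 0:
--                 if walk_dawg(entries, child, word[1:]):
--                     return True
--
--     return False
-- ===== SOURCE B (Python) =====
-- def walk_dawg_scan(entries, start, end, word):
--     """Scan a section looking for a word - single iterative pass, no recursion."""
--     if not word:
--         return False
--     letters = [c.lower() for c in word]
--     n = len(entries)
--     for idx in range(start, end):
--         entry = entries[idx]
--         if chr(entry & 0xFF) != letters[0]:
--             continue
--         if len(letters) == 1:
--             if entry & 0x100:
--                 return True
--             continue
--         node = entry >> 10
--         if node <= 0:
--             continue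
--         pos = 1
--         matched = False
--         while True:
--             if node <= 0 or node >= n:
--                 break
--             # scan the sibling chain at node for letters[pos]
--             found = None
--             i = node
--             while i < n:
--                 e = entries[i]
--                 if chr(e & 0xFF) == letters[pos]:
--                     found = e
--                     break
--                 if e & 0x200:
--                     break
--                 i += 1
--             if found is None:
--                 break
--             if pos == len(letters) - 1:
--                 matched = bool(found & 0x100)
--                 break
--             child = found >> 10
--             if child <= 0:
--                 break
--             node = child
--             pos += 1
--         if matched:
--             return True
--     return False
-- ===== Notes on version B (the rewrite author's own statement) =====
-- stated objective: alternative
-- what changed: The recursive helper walk_dawg is eliminated: B inlines the whole validation into walk_dawg_scan as a single iterative pass that keeps (node, pos) state, pre-lowercases the word once, and walks sibling chains with explicit inner loops instead of recursion and repeated word[1:] slicing.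
-- outside the precondition, e.g. on walk_dawg_scan([353], 0, 2, 'a'): A returns True, B returns True
import Mathlib
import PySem

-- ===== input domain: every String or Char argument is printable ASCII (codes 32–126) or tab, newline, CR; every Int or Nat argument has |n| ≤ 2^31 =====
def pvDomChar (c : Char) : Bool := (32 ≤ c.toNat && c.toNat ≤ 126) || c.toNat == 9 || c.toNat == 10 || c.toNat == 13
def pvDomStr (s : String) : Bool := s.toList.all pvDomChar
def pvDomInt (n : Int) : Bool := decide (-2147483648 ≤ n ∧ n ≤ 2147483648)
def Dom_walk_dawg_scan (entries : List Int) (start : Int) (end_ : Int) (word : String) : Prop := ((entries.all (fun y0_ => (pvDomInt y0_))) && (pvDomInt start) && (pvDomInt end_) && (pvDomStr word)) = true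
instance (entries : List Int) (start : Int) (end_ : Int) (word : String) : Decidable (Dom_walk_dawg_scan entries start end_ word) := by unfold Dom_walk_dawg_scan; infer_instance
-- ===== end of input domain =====

-- B replaces A's recursive helper walk_dawg by a single iterative walk with (node, pos) state
-- and a pre-lowercased word (objective: alternative decomposition, same exact return value).

-- `c.lower()` as an integer code point: exact on the ASCII domain (PySem.Chars.lowerChar is Python's str.lower per char)
def pvLowInt (c : Char) : Int := ((PySem.Chars.lowerChar c).toNat : Int)

-- ===== PORT A =====
-- walk_dawg: recursion on the remaining word; the sibling `while idx < len(entries)` loop is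
-- walkSibA with fuel = entries.length (enough: idx only grows, the loop runs < entries.length steps;
-- when fuel is exhausted idx is already ≥ len(entries), where Python's loop also falls through to False).
mutual
def walkDawgA (entries : List Int) (start_idx : Int) (rest : List Char) : Bool :=
  match rest with
  | [] => true
  | t :: rs =>
    if start_idx ≤ 0 ∨ (entries.length : Int) ≤ start_idx then false
    else walkSibA entries t rs start_idx entries.length
termination_by ((rest.length, 1, 0) : Nat × Nat × Nat)

def walkSibA (entries : List Int) (t : Char) (rs : List Char) (idx : Int) (fuel : Nat) : Bool :=
  match fuel with
  | 0 => false
  | Nat.succ f =>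
    if idx < (entries.length : Int) then
      -- entry = entries[idx]; inside Pre_ the index is always valid, so getD's default is never used
      let entry := (PySem.List.pyGet? entries idx).getD 0
      let letter : Int := PySem.Int.band entry 255           -- chr(entry & 0xFF), compared by code point
      let is_word : Bool := decide (PySem.Int.band entry 256 ≠ 0)   -- bool(entry & 0x100)
      let is_last : Bool := decide (PySem.Int.band entry 512 ≠ 0)   -- bool(entry & 0x200)
      let child : Int := entry >>> 10                        -- entry >> 10 (Python-exact arithmetic shift)
      if letter = pvLowInt t then
        if rs = [] then is_word
        else if 0 < child then walkDawgA entries child rs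
        else false
      else if is_last then false
      else walkSibA entries t rs (idx + 1) f
    else false
termination_by ((rs.length + 1, 0, fuel) : Nat × Nat × Nat)
end

def walk_dawg_scan (entries : List Int) (start : Int) (end_ : Int) (word : String) : Bool :=
  match word.toList with
  | [] => false
  | c :: cs =>
    let target := pvLowInt c
    -- `for idx in range(start, end): … return True` = any over the range
    (PySem.List.pyRange start end_ 1).any (fun idx =>
      let entry := (PySem.List.pyGet? entries idx).getD 0
      if PySem.Int.band entry 255 = target then
        let child := entry >>> 10
        if cs = [] then decide (PySem.Int.band entry 256 ≠ 0)
        else if 0 < child then walkDawgA entries child cs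
        else false
      else false)

-- ===== PORT B =====
-- inner `while i < n` sibling-chain scan of Source B, returning the matched entry (found) or none
def sibFindB (entries : List Int) (target : Int) (i : Int) (fuel : Nat) : Option Int :=
  match fuel with
  | 0 => none
  | Nat.succ f =>
    if i < (entries.length : Int) then
      let e := (PySem.List.pyGet? entries i).getD 0
      if PySem.Int.band e 255 = target then some e
      else if PySem.Int.band e 512 ≠ 0 then none
      else sibFindB entries target (i + 1) f
    else none

-- the `while True` walk of Source B: state (node, pos); recursion on the suffix letters[pos:]
def walkIterB (entries : List Int) (node : Int) (sub : List Int) : Bool :=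
  match sub with
  | [] => false
  | l :: ls =>
    if node ≤ 0 ∨ (entries.length : Int) ≤ node then false
    else
      match sibFindB entries l node entries.length with
      | none => false
      | some e =>
        if ls = [] then decide (PySem.Int.band e 256 ≠ 0)
        else
          let child := e >>> 10
          if child ≤ 0 then false
          else walkIterB entries child ls

def walk_dawg_scan_alt (entries : List Int) (start : Int) (end_ : Int) (word : String) : Bool :=
  let letters := word.toList.map pvLowInt     -- letters = [c.lower() for c in word], as code points
  match letters with
  | [] => false
  | l0 :: ls =>
    (PySem.List.pyRange start end_ 1).any (fun idx =>
      let entry := (PySem.List.pyGet? entries idx).getD 0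
      if PySem.Int.band entry 255 ≠ l0 then false
      else if ls = [] then decide (PySem.Int.band entry 256 ≠ 0)
      else
        let node := entry >>> 10
        if node ≤ 0 then false
        else walkIterB entries node ls)

-- ===== PRECONDITION & SPEC =====
-- Pre_ excludes exactly the scan ranges that step outside the list, where `entries[idx]` can raise
-- IndexError; it is conservative: a run that early-returns True before reaching the bad index is also
-- excluded (both programs return the same value there, see the cite in claim.json).
def Pre_walk_dawg_scan (entries : List Int) (start : Int) (end_ : Int) (word : String) : Prop :=
  word.toList = [] ∨ end_ ≤ start ∨ (-(entries.length : Int) ≤ start ∧ end_ ≤ (entries.length : Int))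
instance (entries : List Int) (start : Int) (end_ : Int) (word : String) : Decidable (Pre_walk_dawg_scan entries start end_ word) := by unfold Pre_walk_dawg_scan; infer_instance

def pvWitness_walk_dawg_scan : List Int × Int × Int × String := ([353], 0, 1, "a")

def Spec_walk_dawg_scan (entries : List Int) (start : Int) (end_ : Int) (word : String) (out : Bool) : Prop := out = walk_dawg_scan_alt entries start end_ word
instance (entries : List Int) (start : Int) (end_ : Int) (word : String) (out : Bool) : Decidable (Spec_walk_dawg_scan entries start end_ word out) := by unfold Spec_walk_dawg_scan; infer_instance

-- ===== CLAIM (what is proved, stated in full; the proofs are below) =====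
def Claim_equal_walk_dawg_scan : Prop := ∀ (entries : List Int) (start : Int) (end_ : Int) (word : String), Dom_walk_dawg_scan entries start end_ word → Pre_walk_dawg_scan entries start end_ word → Spec_walk_dawg_scan entries start end_ word (walk_dawg_scan entries start end_ word)

-- ===== LEMMAS AND PROOFS =====

theorem walkDawgA_eq_walkIterB (entries : List Int) (rest : List Char) :
    ∀ idx : Int, rest ≠ [] → walkDawgA entries idx rest = walkIterB entries idx (rest.map pvLowInt) := by
  induction rest with
  | nil => intro idx h; exact absurd rfl h
  | cons c cs ih =>
    intro idx _
    have hsib : ∀ (f : Nat) (j : Int),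
        walkSibA entries c cs j f =
          (match sibFindB entries (pvLowInt c) j f with
           | none => false
           | some e =>
             if cs = [] then decide (PySem.Int.band e 256 ≠ 0)
             else if e >>> 10 ≤ 0 then false
             else walkIterB entries (e >>> 10) (cs.map pvLowInt)) := by
      intro f
      induction f with
      | zero => intro j; simp only [walkSibA, sibFindB]
      | succ f ihf =>
        intro j
        rw [walkSibA, sibFindB]
        by_cases hj : j < (entries.length : Int)
        · simp only [if_pos hj]
          set e := (PySem.List.pyGet? entries j).getD 0 with he
          by_cases hm : PySem.Int.band e 255 = pvLowInt c
          · simp only [if_pos hm]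
            by_cases hcs : cs = []
            · simp [hcs]
            · simp only [if_neg hcs]
              split_ifs with h1 h2
              · omega
              · exact ih _ hcs
              · rfl
              · omega
          · simp only [if_neg hm]
            by_cases hl : PySem.Int.band e 512 ≠ 0
            · simp [hl]
            · simp only [hl, decide_false, Bool.false_eq_true, if_false]
              exact ihf (j + 1)
        · simp only [if_neg hj]
    rw [walkDawgA, List.map_cons, walkIterB]
    by_cases hb : idx ≤ 0 ∨ (entries.length : Int) ≤ idx
    · simp [hb]
    · simp only [if_neg hb]
      rw [hsib]
      cases sibFindB entries (pvLowInt c) idx entries.length with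
      | none => rfl
      | some e => simp [List.map_eq_nil_iff]

theorem scan_eq (entries : List Int) (start : Int) (end_ : Int) (word : String) :
    walk_dawg_scan entries start end_ word = walk_dawg_scan_alt entries start end_ word := by
  unfold walk_dawg_scan walk_dawg_scan_alt
  cases hw : word.toList with
  | nil => simp
  | cons c cs =>
    simp only [List.map_cons]
    congr 1
    funext idx
    set e := (PySem.List.pyGet? entries idx).getD 0 with he
    by_cases hm : PySem.Int.band e 255 = pvLowInt c
    · simp only [hm, ne_eq, not_true_eq_false, if_false, if_true]
      by_cases hcs : cs = []
      · simp [hcs]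
      · simp only [if_neg hcs, List.map_eq_nil_iff]
        split_ifs with h1 h2
        · omega
        · exact walkDawgA_eq_walkIterB entries cs _ hcs
        · rfl
        · omega
    · simp [hm]

-- ===== VERDICT (by name: the statement is the Claim_ definition above) =====
theorem walk_dawg_scan_spec : Claim_equal_walk_dawg_scan := by
  intro entries start end_ word _ _
  unfold Spec_walk_dawg_scan
  exact scan_eq entries start end_ word
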